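-- pv_equiv track=rewrite | github.com/migueldgoncalves/Viajar | src/travel/support/sorter.py | split_by_number_sequences
-- ===== SOURCE A (Python) =====
-- def split_by_number_sequences(string_list: list[str]) -> list[str]:
--     """
--     Splits words with alphanumeric chars into blocks with either numbers only or no numbers at all
--     A number-only block will be followed by an empty block if the original word has no letters afterward
--     -A-5 -> ['A-', '5', '']
--     -A-5R -> ['A-', '5', 'R']
--     :param string_list:
--     :return:
--     """
--     list_to_return: list[str] = []
--     for word in string_list:
--
--         blocks: list[str] = []
--         block: str = ''
--         numeric: bool = False
--
--         for i in range(len(word)):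
--             letter: str = word[i]
--             if numeric == is_number(letter):
--                 block += letter
--             else:
--                 numeric = is_number(letter)
--                 if block:
--                     blocks.append(block)
--                 block = ''
--                 block += letter
--
--             if i == len(word) - 1:
--                 blocks.append(block)
--                 if is_number(letter):
--                     blocks.append('')
--
--         list_to_return.extend(blocks)
--
--     return list_to_return
--
-- def is_number(char: str) -> bool:
--     return char.isdigit()
-- ===== SOURCE B (Python) =====
-- def is_number(char: str) -> bool:
--     return char.isdigit()
--
--
-- def split_by_number_sequences(string_list: list[str]) -> list[str]:
--     result: list[str] = []
--     for word in string_list: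
--         n = len(word)
--         if n == 0:
--             continue
--         keys = [is_number(c) for c in word]
--         cuts = [0] + [i for i in range(1, n) if keys[i] != keys[i - 1]] + [n]
--         result.extend(word[a:b] for a, b in zip(cuts, cuts[1:]))
--         if keys[-1]:
--             result.append('')
--     return result
-- ===== Notes on version B (the rewrite author's own statement) =====
-- stated objective: alternative
-- what changed: Replaces A's single-pass character state machine (mutable block/blocks/numeric accumulators) by a staged index-based method: first compute the boundary positions where the digit/non-digit key changes, then cut the word into substrings by slicing between consecutive boundaries, with the trailing-empty-block quirk expressed once via the last key.
import Mathlib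
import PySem

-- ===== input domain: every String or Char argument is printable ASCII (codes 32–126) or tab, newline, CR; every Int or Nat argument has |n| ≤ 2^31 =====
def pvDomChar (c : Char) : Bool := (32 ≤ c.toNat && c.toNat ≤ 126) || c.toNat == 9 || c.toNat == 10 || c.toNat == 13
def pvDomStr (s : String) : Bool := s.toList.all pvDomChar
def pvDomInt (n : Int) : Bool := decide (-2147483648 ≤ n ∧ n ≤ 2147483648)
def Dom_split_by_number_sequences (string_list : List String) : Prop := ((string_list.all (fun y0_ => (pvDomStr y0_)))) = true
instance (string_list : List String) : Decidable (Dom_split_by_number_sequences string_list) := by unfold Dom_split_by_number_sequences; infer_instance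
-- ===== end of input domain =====

-- B replaces A's single-pass character state machine by a staged method (boundary indices, then slicing); return value proved equal.

-- ===== PORT A =====
-- is_number(char): char.isdigit() (exact on the ASCII domain via PySem)
def pvIsNumber (c : Char) : Bool := PySem.Chars.isdigit c

-- A's inner 'for i in range(len(word))' loop: structural recursion over the word's
-- characters with the same state (blocks, block, numeric); 'rest = []' is 'i == len(word)-1'.
-- Strings are carried as their char lists; String.mk is applied where A appends to list_to_return.
def pvALoop : List (List Char) → List Char → Bool → List Char → List (List Char)
  | blocks, _, _, [] => blocks
  | blocks, block, numeric, letter :: rest =>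
    let st :=
      if numeric == pvIsNumber letter then (blocks, block ++ [letter], numeric)
      else ((if block ≠ [] then blocks ++ [block] else blocks), [letter], pvIsNumber letter)
    if rest.isEmpty then
      st.1 ++ [st.2.1] ++ (if pvIsNumber letter then [[]] else [])
    else pvALoop st.1 st.2.1 st.2.2 rest

def split_by_number_sequences (string_list : List String) : List String :=
  string_list.foldl
    (fun list_to_return word =>
      list_to_return ++ (pvALoop [] [] false word.toList).map String.mk) []

-- ===== PORT B =====
-- keys = [is_number(c) for c in word]
def pvKeys (cs : List Char) : List Bool := cs.map pvIsNumber

-- cuts = [0] + [i for i in range(1, n) if keys[i] != keys[i-1]] + [n]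
-- range(1, n) is List.range' 1 (n-1); all indices are nonnegative and in range, so
-- Nat indexing with getD is exact here.
def pvCuts (keys : List Bool) : List Nat :=
  0 :: (List.range' 1 (keys.length - 1)).filter
        (fun i => keys.getD i false != keys.getD (i - 1) false) ++ [keys.length]

-- word[a:b] for a, b in zip(cuts, cuts[1:]); with 0 ≤ a ≤ b ≤ len(word) the Python
-- slice word[a:b] is exactly (drop a).take (b - a).
def pvSliceBlocks (cs : List Char) (cuts : List Nat) : List (List Char) :=
  (cuts.zip cuts.tail).map (fun p => (cs.drop p.1).take (p.2 - p.1))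

def split_by_number_sequences_alt (string_list : List String) : List String :=
  string_list.foldl
    (fun result word =>
      if word.toList.length = 0 then result   -- 'continue' on the empty word
      else
        result ++ (pvSliceBlocks word.toList (pvCuts (pvKeys word.toList))).map String.mk ++
          (if (pvKeys word.toList).getLastD false then [""] else [])) []

-- ===== PRECONDITION & SPEC =====
def Spec_split_by_number_sequences (string_list : List String) (out : List String) : Prop := out = split_by_number_sequences_alt string_list
instance (string_list : List String) (out : List String) : Decidable (Spec_split_by_number_sequences string_list out) := by unfold Spec_split_by_number_sequences; infer_instance

-- ===== CLAIM (what is proved, stated in full; the proofs are below) =====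
def Claim_equal_split_by_number_sequences : Prop := ∀ (string_list : List String), Dom_split_by_number_sequences string_list → Spec_split_by_number_sequences string_list (split_by_number_sequences string_list)

-- ===== LEMMAS AND PROOFS =====

-- proof-side characterisation of both programs: the maximal digit/non-digit runs
def pvRuns : List Char → List (List Char)
  | [] => []
  | c :: cs =>
    (c :: cs.takeWhile (fun d => pvIsNumber d == pvIsNumber c)) ::
      pvRuns (cs.dropWhile (fun d => pvIsNumber d == pvIsNumber c))
  termination_by cs => cs.length
  decreasing_by
    simp only [List.length_cons]
    exact Nat.lt_succ_of_le (List.length_dropWhile_le _ _)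

@[simp] lemma pvRuns_nil : pvRuns [] = [] := by rw [pvRuns]

lemma pvRuns_cons (c : Char) (cs : List Char) :
    pvRuns (c :: cs) =
      (c :: cs.takeWhile (fun d => pvIsNumber d == pvIsNumber c)) ::
        pvRuns (cs.dropWhile (fun d => pvIsNumber d == pvIsNumber c)) := by
  rw [pvRuns]

lemma pvRuns_cons_same (c c' : Char) (cs : List Char) (h : pvIsNumber c' = pvIsNumber c) :
    pvRuns (c :: c' :: cs) =
      (c :: (pvRuns (c' :: cs)).headD []) :: (pvRuns (c' :: cs)).tail := by
  rw [pvRuns_cons, pvRuns_cons]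
  simp [List.takeWhile, List.dropWhile, h]

lemma pvRuns_cons_diff (c c' : Char) (cs : List Char) (h : pvIsNumber c' ≠ pvIsNumber c) :
    pvRuns (c :: c' :: cs) = [c] :: pvRuns (c' :: cs) := by
  have hkb : (pvIsNumber c' == pvIsNumber c) = false := beq_eq_false_iff_ne.mpr h
  rw [pvRuns_cons]
  simp [List.takeWhile, List.dropWhile, hkb]

-- the trailing-empty-block quirk, per word
def pvQuirk (cs : List Char) : List (List Char) :=
  if cs.getLast?.any pvIsNumber then [[]] else []

lemma pvQuirk_cons_cons (c c' : Char) (cs : List Char) :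
    pvQuirk (c :: c' :: cs) = pvQuirk (c' :: cs) := by
  simp [pvQuirk]

lemma pvQuirk_singleton (c : Char) :
    pvQuirk [c] = (if pvIsNumber c then [[]] else []) := by
  simp [pvQuirk]

-- ---- A-side: the state machine produces runs ++ quirk ----
lemma pvALoop_eq (cs : List Char) : ∀ (blocks : List (List Char)) (block : List Char) (numeric : Bool),
    cs ≠ [] →
    pvALoop blocks block numeric cs =
      (if numeric == pvIsNumber (cs.headD ' ') then
        blocks ++ (block ++ (pvRuns cs).headD []) :: (pvRuns cs).tail ++ pvQuirk cs
      else
        (if block ≠ [] then blocks ++ [block] else blocks) ++ pvRuns cs ++ pvQuirk cs) := by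
  induction cs with
  | nil => intro _ _ _ h; exact absurd rfl h
  | cons c cs ih =>
    intro blocks block numeric _
    simp only [List.headD_cons]
    cases cs with
    | nil =>
      simp only [pvALoop]
      by_cases hnum : numeric == pvIsNumber c <;>
        simp [hnum, pvRuns_cons, pvQuirk_singleton]
    | cons c' rest =>
      have hc' : (c' :: rest) ≠ [] := by simp
      have hstep_t : ∀ h : numeric == pvIsNumber c,
          pvALoop blocks block numeric (c :: c' :: rest)
            = pvALoop blocks (block ++ [c]) numeric (c' :: rest) := by
        intro h; simp [pvALoop, h]
      have hstep_f : ∀ h : ¬ (numeric == pvIsNumber c) = true,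
          pvALoop blocks block numeric (c :: c' :: rest)
            = pvALoop (if block ≠ [] then blocks ++ [block] else blocks) [c]
                (pvIsNumber c) (c' :: rest) := by
        intro h; simp only [pvALoop, if_neg h, List.isEmpty_cons, if_neg,
          Bool.false_eq_true, not_false_iff]
      by_cases hkey : pvIsNumber c' = pvIsNumber c
      · have hrun := pvRuns_cons_same c c' rest hkey
        by_cases hnum : numeric == pvIsNumber c
        · rw [hstep_t hnum, ih blocks (block ++ [c]) numeric hc']
          simp only [List.headD_cons]
          rw [if_pos (by simpa [hkey] using hnum), if_pos hnum]
          rw [hrun, pvQuirk_cons_cons]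
          simp
        · rw [hstep_f hnum, ih _ [c] (pvIsNumber c) hc']
          simp only [List.headD_cons]
          rw [if_pos (by simp [hkey]), if_neg hnum]
          rw [hrun, pvQuirk_cons_cons]
          simp
      · have hrun := pvRuns_cons_diff c c' rest hkey
        by_cases hnum : numeric == pvIsNumber c
        · rw [hstep_t hnum, ih blocks (block ++ [c]) numeric hc']
          simp only [List.headD_cons]
          rw [if_neg (by
            simp only [beq_iff_eq] at hnum ⊢
            rw [hnum]; exact fun h => hkey h.symm), if_pos hnum]
          rw [hrun, pvQuirk_cons_cons]
          simp
        · rw [hstep_f hnum, ih _ [c] (pvIsNumber c) hc']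
          simp only [List.headD_cons]
          rw [if_neg (by
            simp only [beq_iff_eq]
            exact fun h => hkey h.symm), if_neg hnum]
          rw [hrun, pvQuirk_cons_cons]
          simp

theorem pvWordA_eq (w : List Char) :
    pvALoop [] [] false w = pvRuns w ++ pvQuirk w := by
  cases w with
  | nil => simp [pvALoop, pvQuirk]
  | cons c cs =>
    rw [pvALoop_eq _ _ _ _ (by simp)]
    split
    · rw [pvRuns_cons]; simp
    · simp

-- ---- B-side: boundary indices + slicing also produce the runs ----

-- recursive form of the zip-of-adjacent-cuts slicing
def pvZS (cs : List Char) : List Nat → List (List Char)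
  | a :: b :: r => ((cs.drop a).take (b - a)) :: pvZS cs (b :: r)
  | _ => []

lemma pvSliceBlocks_eq_ZS (cs : List Char) (l : List Nat) :
    pvSliceBlocks cs l = pvZS cs l := by
  induction l with
  | nil => simp [pvSliceBlocks, pvZS]
  | cons a r ih =>
    cases r with
    | nil => simp [pvSliceBlocks, pvZS]
    | cons b r' =>
      simp only [pvSliceBlocks, pvZS, List.tail_cons, List.zip_cons_cons, List.map_cons]
      exact congrArg _ (by simpa [pvSliceBlocks] using ih)

lemma pvZS_shift (c : Char) (cs : List Char) (l : List Nat) :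
    pvZS (c :: cs) (l.map (· + 1)) = pvZS cs l := by
  induction l with
  | nil => rfl
  | cons a r ih =>
    cases r with
    | nil => rfl
    | cons b r' =>
      show ((c :: cs).drop (a + 1)).take ((b + 1) - (a + 1)) ::
          pvZS (c :: cs) ((b :: r').map (· + 1)) = ((cs.drop a).take (b - a)) :: pvZS cs (b :: r')
      rw [List.drop_succ_cons, Nat.add_sub_add_right, ih]

-- the middle of pvCuts, as a function of the key list
def pvF (keys : List Bool) : List Nat :=
  (List.range' 1 (keys.length - 1)).filter
    (fun i => keys.getD i false != keys.getD (i - 1) false)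

lemma pvCuts_eq (keys : List Bool) :
    pvCuts keys = 0 :: (pvF keys ++ [keys.length]) := by
  simp [pvCuts, pvF]

lemma pvF_cons (k k2 : Bool) (ks : List Bool) :
    pvF (k :: k2 :: ks) = (if k2 != k then [1] else []) ++ (pvF (k2 :: ks)).map (· + 1) := by
  have hr : List.range' 1 ((k :: k2 :: ks).length - 1)
      = 1 :: (List.range' 1 ((k2 :: ks).length - 1)).map (· + 1) := by
    simp only [List.length_cons, Nat.add_sub_cancel]
    rw [List.range'_succ]
    congr 1
    have := List.map_add_range' (a := 1) (s := 1) (n := ks.length) (step := 1)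
    simpa [Nat.add_comm] using this.symm
  have hstep : ∀ i ∈ List.range' 1 ((k2 :: ks).length - 1),
      ((k :: k2 :: ks).getD (i + 1) false != (k :: k2 :: ks).getD (i + 1 - 1) false)
        = ((k2 :: ks).getD i false != (k2 :: ks).getD (i - 1) false) := by
    intro i hi
    have h1 : 1 ≤ i := (List.mem_range'_1.mp hi).1
    obtain ⟨j, rfl⟩ := Nat.exists_eq_add_of_le h1
    simp [Nat.add_comm 1 j]
  unfold pvF
  rw [hr, List.filter_cons, List.filter_map,
    List.filter_congr (fun i hi => by simp only [Function.comp_apply]; exact hstep i hi)]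
  by_cases h : (k2 != k) = true
  · rw [if_pos (show ((k :: k2 :: ks).getD 1 false != (k :: k2 :: ks).getD (1 - 1) false) = true by simpa using h)]
    simp [h]
  · rw [if_neg (by simpa using h)]
    simp [h]

lemma pvBlocks_eq_runs (cs : List Char) (h : cs ≠ []) :
    pvZS cs (pvCuts (pvKeys cs)) = pvRuns cs := by
  induction cs with
  | nil => exact absurd rfl h
  | cons c cs ih =>
    cases cs with
    | nil =>
      simp [pvCuts_eq, pvKeys, pvF, pvZS, pvRuns_cons]
    | cons c2 t =>
      have hc' : (c2 :: t) ≠ [] := by simp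
      have ih' := ih hc'
      have hkeys : pvKeys (c :: c2 :: t) = pvIsNumber c :: pvIsNumber c2 :: pvKeys t := by
        simp [pvKeys]
      have hlen : (pvKeys (c :: c2 :: t)).length = (c :: c2 :: t).length := by simp [pvKeys]
      have hlen' : (pvKeys (c2 :: t)).length = (c2 :: t).length := by simp [pvKeys]
      -- v is the tail of the cut list of the shorter word
      set v : List Nat := pvF (pvKeys (c2 :: t)) ++ [(c2 :: t).length] with hv
      have hcut' : pvCuts (pvKeys (c2 :: t)) = 0 :: v := by
        rw [pvCuts_eq, hlen', hv]
      rw [hcut'] at ih'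
      have hvne : v ≠ [] := by simp [hv]
      obtain ⟨v0, v', hv0⟩ := List.exists_cons_of_ne_nil hvne
      by_cases hkey : pvIsNumber c2 = pvIsNumber c
      · -- first run extends
        have hF : pvF (pvKeys (c :: c2 :: t)) = (pvF (pvKeys (c2 :: t))).map (· + 1) := by
          rw [hkeys, pvF_cons]
          · simp [hkey, pvKeys]
        have hcut : pvCuts (pvKeys (c :: c2 :: t)) = 0 :: v.map (· + 1) := by
          rw [pvCuts_eq, hF, hlen, hv]
          simp
        rw [hcut, hv0]
        simp only [List.map_cons]
        show ((c :: c2 :: t).drop 0).take (v0 + 1 - 0) ::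
            pvZS (c :: c2 :: t) ((v0 + 1) :: v'.map (· + 1)) = _
        have h2 : pvZS (c :: c2 :: t) ((v0 + 1) :: v'.map (· + 1))
            = pvZS (c2 :: t) (v0 :: v') := by
          have : (v0 + 1) :: v'.map (· + 1) = (v0 :: v').map (· + 1) := by simp
          rw [this, pvZS_shift]
        rw [h2, pvRuns_cons_same c c2 t hkey, ← ih', hv0]
        show (c :: (c2 :: t).take v0) :: pvZS (c2 :: t) (v0 :: v')
            = (c :: (pvZS (c2 :: t) (0 :: v0 :: v')).headD []) ::
                (pvZS (c2 :: t) (0 :: v0 :: v')).tail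
        simp [pvZS]
      · -- run break at index 1
        have hF : pvF (pvKeys (c :: c2 :: t)) = 1 :: (pvF (pvKeys (c2 :: t))).map (· + 1) := by
          rw [hkeys, pvF_cons]
          have : (pvIsNumber c2 != pvIsNumber c) = true := by
            simpa using hkey
          simp [this, pvKeys]
        have hcut : pvCuts (pvKeys (c :: c2 :: t)) = 0 :: 1 :: v.map (· + 1) := by
          rw [pvCuts_eq, hF, hlen, hv]
          simp
        rw [hcut]
        show ((c :: c2 :: t).drop 0).take (1 - 0) ::
            pvZS (c :: c2 :: t) (1 :: v.map (· + 1)) = _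
        have h2 : pvZS (c :: c2 :: t) (1 :: v.map (· + 1))
            = pvZS (c2 :: t) (0 :: v) := by
          have : (1 : Nat) :: v.map (· + 1) = (0 :: v).map (· + 1) := by simp
          rw [this, pvZS_shift]
        rw [h2, ih', pvRuns_cons_diff c c2 t hkey]
        simp
      
lemma pvQuirk_keys (cs : List Char) :
    (if (pvKeys cs).getLastD false then [("" : String)] else [])
      = (pvQuirk cs).map String.mk := by
  cases h : cs.getLast? with
  | none =>
    have : cs = [] := by simpa using h
    subst this
    simp [pvKeys, pvQuirk]
  | some c =>
    have hk : (pvKeys cs).getLast? = some (pvIsNumber c) := by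
      simp [pvKeys, List.getLast?_map, h]
    simp only [pvQuirk, h, Option.any_some, List.getLastD_eq_getLast?, hk, Option.getD_some]
    by_cases hb : pvIsNumber c <;> simp [hb] <;> rfl

-- per-word agreement of A's and B's word processing
lemma pvWord_agree (w : String) :
    (pvALoop [] [] false w.toList).map String.mk =
      (if w.toList.length = 0 then []
       else (pvSliceBlocks w.toList (pvCuts (pvKeys w.toList))).map String.mk ++
          (if (pvKeys w.toList).getLastD false then [""] else [])) := by
  by_cases h : w.toList = []
  · simp [h, pvALoop]
  · rw [if_neg (by simpa using h), pvWordA_eq, pvSliceBlocks_eq_ZS,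
      pvBlocks_eq_runs _ h, pvQuirk_keys]
    simp

-- ===== VERDICT (by name: the statement is the Claim_ definition above) =====
theorem split_by_number_sequences_spec : Claim_equal_split_by_number_sequences := by
  intro l hd
  clear hd
  show split_by_number_sequences l = split_by_number_sequences_alt l
  unfold split_by_number_sequences split_by_number_sequences_alt
  induction l using List.reverseRecOn with
  | nil => rfl
  | append_singleton xs x ih =>
    rw [List.foldl_append, List.foldl_append, List.foldl_cons, List.foldl_nil,
      List.foldl_cons, List.foldl_nil, ih, pvWord_agree]
    by_cases h : x = ""
    · simp [h]
    · simp [h, List.append_assoc]
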